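-- pv_equiv track=rewrite | github.com/MTalha641/Algo-project | project algo/polygon.py | sweep_line_intersection
-- ===== SOURCE A (Python) =====
-- def do_line_segments_intersect(seg1, seg2):
--     def orientation(p, q, r):
--         val = (q[1] - p[1]) * (r[0] - q[0]) - (q[0] - p[0]) * (r[1] - q[1])
--         if val == 0:
--             return 0
--         return 1 if val > 0 else 2
--
--     def on_segment(p, q, r):
--         return (q[0] <= max(p[0], r[0]) and q[0] >= min(p[0], r[0]) and
--                 q[1] <= max(p[1], r[1]) and q[1] >= min(p[1], r[1]))
--
--     p1, q1 = seg1
--     p2, q2 = seg2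
--
--     o1 = orientation(p1, q1, p2)
--     o2 = orientation(p1, q1, q2)
--     o3 = orientation(p2, q2, p1)
--     o4 = orientation(p2, q2, q1)
--
--     if (o1 != o2 and o3 != o4) or (o1 == 0 and on_segment(p1, p2, q1)) or (o2 == 0 and on_segment(p1, q2, q1)) or (
--             o3 == 0 and on_segment(p2, p1, q2)) or (o4 == 0 and on_segment(p2, q1, q2)):
--         return True
--     return False
--
-- def sweep_line_intersection(segments):
--     events = []
--     for i, segment in enumerate(segments):
--         events.append((segment[0], i, 'start'))
--         events.append((segment[1], i, 'end'))
--
--     events.sort()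
--
--     active_segments = set()
--     for event in events:
--         if event[2] == 'start':
--             for active_segment in active_segments:
--                 if do_line_segments_intersect(segments[event[1]], segments[active_segment]):
--                     return True
--             active_segments.add(event[1])
--         else:
--             # Check if the segment is in the set before trying to remove it
--             if event[1] in active_segments:
--                 active_segments.remove(event[1])
--
--     return False
-- ===== SOURCE B (Python) =====
-- # Straightforward pairwise check: test every pair of segments once for intersection.
-- def _cross(o, a, b):
--     return (a[0] - o[0]) * (b[1] - o[1]) - (a[1] - o[1]) * (b[0] - o[0])
--
-- def _sign(x):
--     return (x > 0) - (x < 0)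
--
-- def _in_box(p, q, r):
--     return (min(p[0], r[0]) <= q[0] <= max(p[0], r[0]) and
--             min(p[1], r[1]) <= q[1] <= max(p[1], r[1]))
--
-- def _segments_intersect(s, t):
--     p1, q1 = s
--     p2, q2 = t
--     c1 = _cross(p1, q1, p2)
--     c2 = _cross(p1, q1, q2)
--     c3 = _cross(p2, q2, p1)
--     c4 = _cross(p2, q2, q1)
--     if _sign(c1) != _sign(c2) and _sign(c3) != _sign(c4):
--         return True
--     return ((c1 == 0 and _in_box(p1, p2, q1)) or
--             (c2 == 0 and _in_box(p1, q2, q1)) or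
--             (c3 == 0 and _in_box(p2, p1, q2)) or
--             (c4 == 0 and _in_box(p2, q1, q2)))
--
-- def sweep_line_intersection(segments):
--     n = len(segments)
--     for i in range(n):
--         for j in range(i + 1, n):
--             if _segments_intersect(segments[i], segments[j]):
--                 return True
--     return False
-- ===== Notes on version B (the rewrite author's own statement) =====
-- stated objective: simpler
-- what changed: Replaces A's build-events/sort/simulate-the-active-set sweep by a plain check of every unordered pair of segments for intersection, with no event list, no sort and no set state.
-- intended difference: On inputs where some two segments intersect but, for every intersecting pair, one segment's end event precedes the other's start event in the sorted event order, A returns False although an intersection exists (the segment was already dropped from the active set), while B returns True, the intended answer for intersection detection. — e.g. on sweep_line_intersection([((1, 0), (-1, 0)), ((0, 0), (0, 5))]): A returns false, B returns true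
import Mathlib
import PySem

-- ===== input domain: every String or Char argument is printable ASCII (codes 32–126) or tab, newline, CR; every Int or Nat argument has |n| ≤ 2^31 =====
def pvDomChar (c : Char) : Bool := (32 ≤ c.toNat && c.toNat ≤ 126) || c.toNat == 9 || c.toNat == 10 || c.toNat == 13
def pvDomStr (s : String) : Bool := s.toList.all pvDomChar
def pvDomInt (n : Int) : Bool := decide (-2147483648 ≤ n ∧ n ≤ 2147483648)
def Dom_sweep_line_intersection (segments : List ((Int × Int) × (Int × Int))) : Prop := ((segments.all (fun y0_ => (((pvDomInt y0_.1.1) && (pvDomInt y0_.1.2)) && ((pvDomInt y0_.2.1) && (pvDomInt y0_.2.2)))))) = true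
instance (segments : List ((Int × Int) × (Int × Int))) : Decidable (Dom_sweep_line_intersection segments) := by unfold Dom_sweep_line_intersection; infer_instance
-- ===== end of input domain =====

-- B is the plain pairwise intersection test (simpler); A's event-order sweep misses
-- intersecting pairs whose sweep intervals are disjoint in event order (see D_ below).

-- ===== PORT A =====

-- A's nested helper 'orientation'
def pvOrientation (p q r : Int × Int) : Int :=
  let val := (q.2 - p.2) * (r.1 - q.1) - (q.1 - p.1) * (r.2 - q.2)
  if val = 0 then 0 else if val > 0 then 1 else 2

-- A's nested helper 'on_segment'
def pvOnSegment (p q r : Int × Int) : Bool :=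
  decide (q.1 ≤ max p.1 r.1 ∧ min p.1 r.1 ≤ q.1 ∧ q.2 ≤ max p.2 r.2 ∧ min p.2 r.2 ≤ q.2)

def do_line_segments_intersect (seg1 seg2 : (Int × Int) × (Int × Int)) : Bool :=
  let p1 := seg1.1
  let q1 := seg1.2
  let p2 := seg2.1
  let q2 := seg2.2
  let o1 := pvOrientation p1 q1 p2
  let o2 := pvOrientation p1 q1 q2
  let o3 := pvOrientation p2 q2 p1
  let o4 := pvOrientation p2 q2 q1
  if (o1 ≠ o2 ∧ o3 ≠ o4) ∨ (o1 = 0 ∧ pvOnSegment p1 p2 q1 = true)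
      ∨ (o2 = 0 ∧ pvOnSegment p1 q2 q1 = true)
      ∨ (o3 = 0 ∧ pvOnSegment p2 p1 q2 = true)
      ∨ (o4 = 0 ∧ pvOnSegment p2 q1 q2 = true) then true else false

-- one event (point, index, 'start'/'end'); Python compares these tuples lexicographically,
-- which is exactly Mathlib's Lex order on the components (String's < is lexicographic, as Python's)
def pvEvKey (e : (Int × Int) × Int × String) : Lex (Lex (Int × Int) × Lex (Int × String)) :=
  toLex (toLex e.1, toLex (e.2.1, e.2.2))

def pvDefaultSeg : (Int × Int) × (Int × Int) := ((0, 0), (0, 0))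

-- the events list built by the enumerate loop
def pvEvents (segments : List ((Int × Int) × (Int × Int))) : List ((Int × Int) × Int × String) :=
  (PySem.List.enumerate segments 0).foldl
    (fun acc p => acc ++ [(p.2.1, p.1, "start"), (p.2.2, p.1, "end")]) []

-- the event loop; the inner 'for active_segment in active_segments: if …: return True' is a
-- pure existence test over the set, hence order-independent: ported as List.any over the Set
def pvRun (segments : List ((Int × Int) × (Int × Int))) :
    List ((Int × Int) × Int × String) → PySem.Set Int → Bool
  | [], _ => false
  | e :: rest, act =>
    if e.2.2 == "start" then
      if act.any (fun j => do_line_segments_intersect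
          (PySem.List.pyGetD segments e.2.1 pvDefaultSeg)
          (PySem.List.pyGetD segments j pvDefaultSeg)) then true
      else pvRun segments rest (PySem.Set.add act e.2.1)
    else
      if PySem.Set.contains act e.2.1 then
        pvRun segments rest (PySem.Set.discard act e.2.1)
      else
        pvRun segments rest act

def sweep_line_intersection (segments : List ((Int × Int) × (Int × Int))) : Bool :=
  pvRun segments (PySem.List.sorted (pvEvents segments) pvEvKey false) PySem.Set.empty

-- ===== PORT B =====

def pvCross (o a b : Int × Int) : Int :=
  (a.1 - o.1) * (b.2 - o.2) - (a.2 - o.2) * (b.1 - o.1)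

def pvSign (x : Int) : Int := (if x > 0 then 1 else 0) - (if x < 0 then 1 else 0)

def pvInBox (p q r : Int × Int) : Bool :=
  decide (min p.1 r.1 ≤ q.1 ∧ q.1 ≤ max p.1 r.1 ∧ min p.2 r.2 ≤ q.2 ∧ q.2 ≤ max p.2 r.2)

def pvSegmentsIntersect (s t : (Int × Int) × (Int × Int)) : Bool :=
  let c1 := pvCross s.1 s.2 t.1
  let c2 := pvCross s.1 s.2 t.2
  let c3 := pvCross t.1 t.2 s.1
  let c4 := pvCross t.1 t.2 s.2
  if pvSign c1 ≠ pvSign c2 ∧ pvSign c3 ≠ pvSign c4 then true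
  else
    decide ((c1 = 0 ∧ pvInBox s.1 t.1 s.2 = true) ∨ (c2 = 0 ∧ pvInBox s.1 t.2 s.2 = true)
      ∨ (c3 = 0 ∧ pvInBox t.1 s.1 t.2 = true) ∨ (c4 = 0 ∧ pvInBox t.1 s.2 t.2 = true))

-- Source B: for i in range(n): for j in range(i+1, n): if _segments_intersect(...): return True
def sweep_line_intersection_alt (segments : List ((Int × Int) × (Int × Int))) : Bool :=
  (List.range segments.length).any fun i =>
    (List.range' (i + 1) (segments.length - (i + 1))).any fun j =>
      pvSegmentsIntersect (segments.getD i pvDefaultSeg) (segments.getD j pvDefaultSeg)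

-- ===== PRECONDITION & SPEC =====

-- D_'s only own helper: one segment's whole sweep interval precedes the other's
-- start event (events ordered by point, ties by segment index)
def dMissed (a b : (Int × Int) × (Int × Int)) (m n : Nat) : Prop :=
  (toLex a.1 < toLex a.2 ∧ (toLex a.2 < toLex b.1 ∨ (a.2 = b.1 ∧ m < n))) ∨
  (toLex b.1 < toLex b.2 ∧ (toLex b.2 < toLex a.1 ∨ (b.2 = a.1 ∧ n < m)))

-- On inputs where some two segments intersect but, for every intersecting pair, one segment's
-- end event precedes the other's start event in the sorted event order, A returns False even
-- though an intersection exists; B returns True, the intended answer for intersection detection.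
def D_sweep_line_intersection (segments : List ((Int × Int) × (Int × Int))) : Prop :=
  (∃ x ∈ segments.zipIdx, ∃ y ∈ segments.zipIdx,
    x.2 < y.2 ∧ do_line_segments_intersect x.1 y.1 = true) ∧
  ∀ x ∈ segments.zipIdx, ∀ y ∈ segments.zipIdx,
    x.2 < y.2 → do_line_segments_intersect x.1 y.1 = true → dMissed x.1 y.1 x.2 y.2
instance (segments : List ((Int × Int) × (Int × Int))) : Decidable (D_sweep_line_intersection segments) := by
  haveI hM : ∀ a b m n, Decidable (dMissed a b m n) := fun a b m n => by
    unfold dMissed; infer_instance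
  unfold D_sweep_line_intersection
  infer_instance

def Spec_sweep_line_intersection (segments : List ((Int × Int) × (Int × Int))) (out : Bool) : Prop := ¬ D_sweep_line_intersection segments → out = sweep_line_intersection_alt segments
instance (segments : List ((Int × Int) × (Int × Int))) (out : Bool) : Decidable (Spec_sweep_line_intersection segments out) := by unfold Spec_sweep_line_intersection; infer_instance

def pvDiffWitness_sweep_line_intersection : (List ((Int × Int) × (Int × Int))) :=
  [((1, 0), (-1, 0)), ((0, 0), (0, 5))]

def pvDiffWitnessOut_sweep_line_intersection : Bool × Bool := (false, true)

-- ===== CLAIM (what is proved, stated in full; the proofs are below) =====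
def Claim_unchanged_sweep_line_intersection : Prop := ∀ (segments : List ((Int × Int) × (Int × Int))), Dom_sweep_line_intersection segments → Spec_sweep_line_intersection segments (sweep_line_intersection segments)
def Claim_changed_sweep_line_intersection : Prop := Dom_sweep_line_intersection (pvDiffWitness_sweep_line_intersection) ∧ D_sweep_line_intersection (pvDiffWitness_sweep_line_intersection) ∧ sweep_line_intersection (pvDiffWitness_sweep_line_intersection) = pvDiffWitnessOut_sweep_line_intersection.1 ∧ sweep_line_intersection_alt (pvDiffWitness_sweep_line_intersection) = pvDiffWitnessOut_sweep_line_intersection.2 ∧ pvDiffWitnessOut_sweep_line_intersection.1 ≠ pvDiffWitnessOut_sweep_line_intersection.2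
def Claim_exact_sweep_line_intersection : Prop := ∀ (segments : List ((Int × Int) × (Int × Int))), Dom_sweep_line_intersection segments → D_sweep_line_intersection segments → sweep_line_intersection segments ≠ sweep_line_intersection_alt segments

-- ===== LEMMAS AND PROOFS =====

-- proof-only helpers ---------------------------------------------------------

def pvEvLt (e f : (Int × Int) × Int × String) : Prop := pvEvKey e < pvEvKey f

def pvS (segments : List ((Int × Int) × (Int × Int))) (k : Nat) : (Int × Int) × Int × String :=
  ((segments.getD k pvDefaultSeg).1, (k : Int), "start")

def pvE (segments : List ((Int × Int) × (Int × Int))) (k : Nat) : (Int × Int) × Int × String :=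
  ((segments.getD k pvDefaultSeg).2, (k : Int), "end")

def pvStep (act : PySem.Set Int) (e : (Int × Int) × Int × String) : PySem.Set Int :=
  if e.2.2 == "start" then PySem.Set.add act e.2.1
  else if PySem.Set.contains act e.2.1 then PySem.Set.discard act e.2.1 else act

-- 'a hit': somewhere in L there is a start event whose segment intersects one active at that point
def pvHit (segments : List ((Int × Int) × (Int × Int)))
    (L : List ((Int × Int) × Int × String)) (act : PySem.Set Int) : Prop :=
  ∃ P e R, L = P ++ e :: R ∧ e.2.2 = "start" ∧
    ∃ j ∈ P.foldl pvStep act, do_line_segments_intersect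
      (PySem.List.pyGetD segments e.2.1 pvDefaultSeg)
      (PySem.List.pyGetD segments j pvDefaultSeg) = true

-- order characterization -----------------------------------------------------

lemma pvEvLt_iff (e f : (Int × Int) × Int × String) :
    pvEvLt e f ↔ (e.1.1 < f.1.1 ∨ (e.1.1 = f.1.1 ∧ e.1.2 < f.1.2)) ∨
      (e.1 = f.1 ∧ (e.2.1 < f.2.1 ∨ (e.2.1 = f.2.1 ∧ e.2.2 < f.2.2))) := by
  unfold pvEvLt pvEvKey
  rw [Prod.Lex.toLex_lt_toLex, Prod.Lex.toLex_lt_toLex, Prod.Lex.toLex_lt_toLex]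
  simp [Prod.ext_iff]

lemma pvEvKey_inj {e f : (Int × Int) × Int × String} (h : pvEvKey e = pvEvKey f) : e = f := by
  unfold pvEvKey at h
  simp [Prod.ext_iff] at h ⊢
  exact ⟨⟨h.1.1, h.1.2⟩, h.2.1, h.2.2⟩

lemma pvEvLt_asymm {e f : (Int × Int) × Int × String} (h : pvEvLt e f) : ¬ pvEvLt f e := by
  unfold pvEvLt at *
  exact lt_asymm h

-- events list ----------------------------------------------------------------

lemma pv_enum_flat (xs : List ((Int × Int) × (Int × Int))) : ∀ (s : Int),
    (PySem.List.enumerate xs s).flatMap (fun p => [(p.2.1, p.1, "start"), (p.2.2, p.1, "end")])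
      = (List.range xs.length).flatMap (fun k =>
          [((xs.getD k pvDefaultSeg).1, s + (k : Int), "start"),
           ((xs.getD k pvDefaultSeg).2, s + (k : Int), "end")]) := by
  induction xs with
  | nil => intro s; simp [PySem.List.enumerate_nil]
  | cons x xs ih =>
    intro s
    rw [PySem.List.enumerate_cons, List.flatMap_cons, ih (s + 1),
      List.length_cons, List.range_succ_eq_map, List.flatMap_cons, List.flatMap_map]
    have hfun : (fun k => [(((x :: xs).getD (k + 1) pvDefaultSeg).1, s + ((k + 1 : Nat) : Int), "start"),
          (((x :: xs).getD (k + 1) pvDefaultSeg).2, s + ((k + 1 : Nat) : Int), "end")])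
        = (fun k => [((xs.getD k pvDefaultSeg).1, s + 1 + (k : Int), "start"),
          ((xs.getD k pvDefaultSeg).2, s + 1 + (k : Int), "end")]) := by
      funext k
      simp
      omega
    simp only [Nat.succ_eq_add_one, hfun, List.getD_cons_zero, Nat.cast_zero, add_zero]

lemma pvEvents_eq (segments : List ((Int × Int) × (Int × Int))) :
    pvEvents segments =
      (List.range segments.length).flatMap (fun k => [pvS segments k, pvE segments k]) := by
  unfold pvEvents
  rw [PySem.List.foldl_append_eq_flatMap, List.nil_append, pv_enum_flat segments 0]
  simp [pvS, pvE]

lemma pv_mem_events {segments : List ((Int × Int) × (Int × Int))}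
    {e : (Int × Int) × Int × String} :
    e ∈ pvEvents segments ↔
      ∃ k : Nat, k < segments.length ∧ (e = pvS segments k ∨ e = pvE segments k) := by
  rw [pvEvents_eq]
  simp [List.mem_flatMap, List.mem_range]

lemma pv_events_nodup (segments : List ((Int × Int) × (Int × Int))) :
    (pvEvents segments).Nodup := by
  rw [pvEvents_eq, List.nodup_flatMap]
  constructor
  · intro k _
    simp [pvS, pvE]
  · refine (List.pairwise_lt_range).imp ?_
    intro k l hkl e he1 he2
    simp [pvS, pvE, Prod.ext_iff] at he1 he2
    rcases he1 with ⟨_, h1, _⟩ | ⟨_, h1, _⟩ <;> rcases he2 with ⟨_, h2, _⟩ | ⟨_, h2, _⟩ <;> omega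

lemma pvS_inj {segments : List ((Int × Int) × (Int × Int))} {k l : Nat}
    (h : pvS segments k = pvS segments l) : k = l := by
  simp [pvS, Prod.ext_iff] at h
  omega

lemma pvS_ne_pvE {segments : List ((Int × Int) × (Int × Int))} (k l : Nat) :
    pvS segments k ≠ pvE segments l := by
  simp [pvS, pvE, Prod.ext_iff]

-- sorted list ----------------------------------------------------------------

lemma pv_sorted_pairwise (segments : List ((Int × Int) × (Int × Int))) :
    (PySem.List.sorted (pvEvents segments) pvEvKey false).Pairwise pvEvLt := by
  have hnd : (PySem.List.sorted (pvEvents segments) pvEvKey false).Nodup :=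
    ((PySem.List.sorted_perm (pvEvents segments) pvEvKey false).nodup_iff).mpr
      (pv_events_nodup segments)
  have hle := PySem.List.sorted_pairwise (pvEvents segments) pvEvKey
  exact (hle.and hnd).imp fun h => lt_of_le_of_ne h.1 (fun hk => h.2 (pvEvKey_inj hk))

-- the state after a prefix ---------------------------------------------------

lemma pv_mem_step_end (act : PySem.Set Int) (pt : Int × Int) (m j : Int) :
    (j ∈ pvStep act (pt, m, "end")) ↔ (j ∈ act ∧ j ≠ m) := by
  unfold pvStep
  have hne : (("end" : String) == "start") = false := by decide
  rw [hne]
  simp only [Bool.false_eq_true, if_false]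
  by_cases hc : PySem.Set.contains act m = true
  · rw [if_pos hc]
    exact PySem.Set.mem_discard act m j
  · rw [if_neg hc]
    have hm : m ∉ act := fun hm => hc ((PySem.Set.contains_iff act m).mpr hm)
    exact ⟨fun hj => ⟨hj, fun hjm => hm (hjm ▸ hj)⟩, fun h => h.1⟩

lemma pv_mem_state (segments : List ((Int × Int) × (Int × Int))) (j : Int) :
    ∀ P : List ((Int × Int) × Int × String),
      (∀ e ∈ P, e ∈ pvEvents segments) → P.Pairwise pvEvLt →
      ((j ∈ P.foldl pvStep PySem.Set.empty) ↔
        ∃ k : Nat, k < segments.length ∧ j = (k : Int) ∧ pvS segments k ∈ P ∧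
          (pvE segments k ∉ P ∨ pvEvLt (pvE segments k) (pvS segments k))) := by
  intro P
  induction P using List.reverseRecOn with
  | nil =>
    intro _ _
    simp [PySem.Set.empty]
  | append_singleton P e ih =>
    intro hsub hsort
    have hP : P.Pairwise pvEvLt := (List.pairwise_append.mp hsort).1
    have hlt : ∀ x ∈ P, pvEvLt x e := fun x hx =>
      (List.pairwise_append.mp hsort).2.2 x hx e (by simp)
    have hsubP : ∀ x ∈ P, x ∈ pvEvents segments := fun x hx => hsub x (by simp [hx])
    have ihP := ih hsubP hP
    obtain ⟨m, hm, he⟩ := pv_mem_events.mp (hsub e (by simp))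
    rw [List.foldl_append]
    rcases he with he | he
    · -- e is the start event of segment m
      subst he
      have hstep : pvStep (P.foldl pvStep PySem.Set.empty) (pvS segments m)
          = PySem.Set.add (P.foldl pvStep PySem.Set.empty) ((m : Nat) : Int) := by
        simp [pvStep, pvS]
      rw [List.foldl_cons, List.foldl_nil, hstep, PySem.Set.mem_add]
      constructor
      · rintro (hj | hj)
        · obtain ⟨k, hk, hjk, hSk, hEk⟩ := ihP.mp hj
          refine ⟨k, hk, hjk, by simp [hSk], ?_⟩
          rcases hEk with hEk | hEk
          · exact Or.inl (by
              simp only [List.mem_append, List.mem_singleton]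
              rintro (h | h)
              · exact hEk h
              · exact pvS_ne_pvE m k h.symm)
          · exact Or.inr hEk
        · refine ⟨m, hm, hj, by simp, ?_⟩
          by_cases hE : pvE segments m ∈ P
          · exact Or.inr (hlt _ hE)
          · exact Or.inl (by
              simp only [List.mem_append, List.mem_singleton]
              rintro (h | h)
              · exact hE h
              · exact pvS_ne_pvE m m h.symm)
      · rintro ⟨k, hk, hjk, hSk, hEk⟩
        rcases List.mem_append.mp hSk with hSk | hSk
        · refine Or.inl (ihP.mpr ⟨k, hk, hjk, hSk, ?_⟩)
          rcases hEk with hEk | hEk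
          · exact Or.inl (fun h => hEk (List.mem_append.mpr (Or.inl h)))
          · exact Or.inr hEk
        · have : k = m := pvS_inj (List.mem_singleton.mp hSk)
          exact Or.inr (this ▸ hjk)
    · -- e is the end event of segment m
      subst he
      have hE : pvE segments m = ((segments.getD m pvDefaultSeg).2, (m : Int), "end") := rfl
      rw [List.foldl_cons, List.foldl_nil, hE, pv_mem_step_end]
      constructor
      · rintro ⟨hj, hjm⟩
        obtain ⟨k, hk, hjk, hSk, hEk⟩ := ihP.mp hj
        have hkm : k ≠ m := fun h => hjm (by rw [hjk, h])
        refine ⟨k, hk, hjk, by simp [hSk], ?_⟩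
        rcases hEk with hEk | hEk
        · exact Or.inl (by
            simp only [List.mem_append, List.mem_singleton]
            rintro (h | h)
            · exact hEk h
            · exact hkm (by
                have := congrArg (fun x => x.2.1) h
                simp [pvE] at this
                omega))
        · exact Or.inr hEk
      · rintro ⟨k, hk, hjk, hSk, hEk⟩
        have hSkP : pvS segments k ∈ P := by
          rcases List.mem_append.mp hSk with h | h
          · exact h
          · exact absurd (List.mem_singleton.mp h) (pvS_ne_pvE k m)
        have hkm : k ≠ m := by
          intro h
          subst h
          rcases hEk with hEk | hEk
          · exact hEk (List.mem_append.mpr (Or.inr (List.mem_singleton.mpr rfl)))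
          · exact absurd hEk (pvEvLt_asymm (hlt _ hSkP))
        refine ⟨ihP.mpr ⟨k, hk, hjk, hSkP, ?_⟩, fun h => hkm (by exact_mod_cast hjk ▸ h)⟩
        rcases hEk with hEk | hEk
        · exact Or.inl (fun h => hEk (List.mem_append.mpr (Or.inl h)))
        · exact Or.inr hEk

-- the loop -------------------------------------------------------------------

lemma pv_hit_cons (segments : List ((Int × Int) × (Int × Int)))
    (hd : (Int × Int) × Int × String) (rest : List ((Int × Int) × Int × String))
    (act : PySem.Set Int) :
    pvHit segments (hd :: rest) act ↔
      (hd.2.2 = "start" ∧ ∃ j ∈ act, do_line_segments_intersect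
          (PySem.List.pyGetD segments hd.2.1 pvDefaultSeg)
          (PySem.List.pyGetD segments j pvDefaultSeg) = true) ∨
        pvHit segments rest (pvStep act hd) := by
  constructor
  · rintro ⟨P, e, R, hL, hts, hj⟩
    cases P with
    | nil =>
      obtain ⟨rfl, rfl⟩ : hd = e ∧ rest = R := by
        injection hL with h1 h2
        exact ⟨h1, h2⟩
      exact Or.inl ⟨hts, hj⟩
    | cons p P' =>
      obtain ⟨rfl, hrest⟩ : hd = p ∧ rest = P' ++ e :: R := by
        injection hL with h1 h2
        exact ⟨h1, h2⟩
      exact Or.inr ⟨P', e, R, hrest, hts, by rw [← List.foldl_cons]; exact hj⟩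
  · rintro (⟨hts, hj⟩ | ⟨P, e, R, hL, hts, hj⟩)
    · exact ⟨[], hd, rest, rfl, hts, hj⟩
    · exact ⟨hd :: P, e, R, by rw [hL]; rfl, hts, by rw [List.foldl_cons]; exact hj⟩

lemma pv_run_iff (segments : List ((Int × Int) × (Int × Int))) :
    ∀ (L : List ((Int × Int) × Int × String)) (act : PySem.Set Int),
      pvRun segments L act = true ↔ pvHit segments L act := by
  intro L
  induction L with
  | nil =>
    intro act
    simp only [pvRun, Bool.false_eq_true, false_iff]
    rintro ⟨P, e, R, hL, _⟩
    exact absurd hL (by simp)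
  | cons hd rest ih =>
    intro act
    rw [pvRun, pv_hit_cons]
    by_cases hstart : hd.2.2 = "start"
    · have hbeq : (hd.2.2 == "start") = true := by simp [hstart]
      rw [hbeq]
      simp only [if_true]
      have hstep : pvStep act hd = PySem.Set.add act hd.2.1 := by
        simp [pvStep, hbeq]
      by_cases hany : act.any (fun j => do_line_segments_intersect
          (PySem.List.pyGetD segments hd.2.1 pvDefaultSeg)
          (PySem.List.pyGetD segments j pvDefaultSeg)) = true
      · rw [if_pos hany]
        simp only [true_iff]
        exact Or.inl ⟨hstart, List.any_eq_true.mp hany⟩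
      · rw [if_neg hany, ih, hstep]
        constructor
        · exact Or.inr
        · rintro (⟨_, hj⟩ | h)
          · exact absurd (List.any_eq_true.mpr hj) hany
          · exact h
    · have hbeq : (hd.2.2 == "start") = false := by
        exact beq_eq_false_iff_ne.mpr hstart
      rw [hbeq]
      simp only [Bool.false_eq_true, if_false]
      have hstep : (if PySem.Set.contains act hd.2.1 = true
          then pvRun segments rest (PySem.Set.discard act hd.2.1)
          else pvRun segments rest act) = pvRun segments rest (pvStep act hd) := by
        unfold pvStep
        rw [hbeq]
        simp only [Bool.false_eq_true, if_false]
        by_cases hc : PySem.Set.contains act hd.2.1 = true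
        · rw [if_pos hc, if_pos hc]
        · rw [if_neg hc, if_neg hc]
      rw [hstep, ih]
      constructor
      · exact Or.inr
      · rintro (⟨h, _⟩ | h)
        · exact absurd h hstart
        · exact h

-- A characterized ------------------------------------------------------------

lemma pv_sweep_iff (segments : List ((Int × Int) × (Int × Int))) :
    sweep_line_intersection segments = true ↔
      ∃ i j : Nat, i < segments.length ∧ j < segments.length ∧
        pvEvLt (pvS segments j) (pvS segments i) ∧
        (pvEvLt (pvE segments j) (pvS segments j) ∨ pvEvLt (pvS segments i) (pvE segments j)) ∧
        do_line_segments_intersect (segments.getD i pvDefaultSeg) (segments.getD j pvDefaultSeg)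
          = true := by
  unfold sweep_line_intersection
  rw [pv_run_iff]
  set L := PySem.List.sorted (pvEvents segments) pvEvKey false with hLdef
  have hLsort : L.Pairwise pvEvLt := pv_sorted_pairwise segments
  have hLmem : ∀ e, e ∈ L ↔ e ∈ pvEvents segments := fun e =>
    (PySem.List.sorted_perm (pvEvents segments) pvEvKey false).mem_iff
  constructor
  · rintro ⟨P, e, R, hL, hts, j, hj, hdls⟩
    have heL : e ∈ L := by rw [hL]; simp
    obtain ⟨i, hi, he⟩ := pv_mem_events.mp ((hLmem e).mp heL)
    have he' : e = pvS segments i := by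
      rcases he with he | he
      · exact he
      · rw [he] at hts; exact absurd hts (by simp [pvE])
    subst he'
    have hsub : ∀ x ∈ P, x ∈ pvEvents segments := fun x hx =>
      (hLmem x).mp (by rw [hL]; simp [hx])
    have hPsort : P.Pairwise pvEvLt := by
      rw [hL] at hLsort
      exact (List.pairwise_append.mp hLsort).1
    have hPlt : ∀ x ∈ P, pvEvLt x (pvS segments i) := fun x hx => by
      rw [hL] at hLsort
      exact (List.pairwise_append.mp hLsort).2.2 x hx _ (by simp)
    have hRgt : ∀ x ∈ R, pvEvLt (pvS segments i) x := fun x hx => by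
      rw [hL] at hLsort
      exact (List.rel_of_pairwise_cons (List.pairwise_append.mp hLsort).2.1) hx
    obtain ⟨k, hk, hjk, hSk, hEk⟩ := (pv_mem_state segments j P hsub hPsort).mp hj
    refine ⟨i, k, hi, hk, hPlt _ hSk, ?_, ?_⟩
    · rcases hEk with hEk | hEk
      · have hEL : pvE segments k ∈ L := (hLmem _).mpr (pv_mem_events.mpr ⟨k, hk, Or.inr rfl⟩)
        rw [hL] at hEL
        rcases List.mem_append.mp hEL with h | h
        · exact absurd h hEk
        · rcases List.mem_cons.mp h with h | h
          · exact absurd h.symm (pvS_ne_pvE i k)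
          · exact Or.inr (hRgt _ h)
      · exact Or.inl hEk
    · rw [hjk] at hdls
      have hred : (pvS segments i).2.1 = ((i : Nat) : Int) := rfl
      rw [hred, PySem.List.pyGetD_natCast, PySem.List.pyGetD_natCast] at hdls
      exact hdls
  · rintro ⟨i, j, hi, hj, hlt, hcond, hdls⟩
    have hSiL : pvS segments i ∈ L := (hLmem _).mpr (pv_mem_events.mpr ⟨i, hi, Or.inl rfl⟩)
    obtain ⟨P, R, hL⟩ := List.append_of_mem hSiL
    have hPsort : P.Pairwise pvEvLt := by
      rw [hL] at hLsort
      exact (List.pairwise_append.mp hLsort).1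
    have hPlt : ∀ x ∈ P, pvEvLt x (pvS segments i) := fun x hx => by
      rw [hL] at hLsort
      exact (List.pairwise_append.mp hLsort).2.2 x hx _ (by simp)
    have hRgt : ∀ x ∈ R, pvEvLt (pvS segments i) x := fun x hx => by
      rw [hL] at hLsort
      exact (List.rel_of_pairwise_cons (List.pairwise_append.mp hLsort).2.1) hx
    have hsub : ∀ x ∈ P, x ∈ pvEvents segments := fun x hx =>
      (hLmem x).mp (by rw [hL]; simp [hx])
    have hSjP : pvS segments j ∈ P := by
      have hSjL : pvS segments j ∈ L := (hLmem _).mpr (pv_mem_events.mpr ⟨j, hj, Or.inl rfl⟩)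
      rw [hL] at hSjL
      rcases List.mem_append.mp hSjL with h | h
      · exact h
      · rcases List.mem_cons.mp h with h | h
        · rw [h] at hlt; exact absurd hlt (lt_irrefl _)
        · exact absurd hlt (pvEvLt_asymm (hRgt _ h))
    refine ⟨P, pvS segments i, R, hL, rfl, (j : Int), ?_, ?_⟩
    · refine (pv_mem_state segments (j : Int) P hsub hPsort).mpr ⟨j, hj, rfl, hSjP, ?_⟩
      rcases hcond with h | h
      · exact Or.inr h
      · exact Or.inl (fun hEP => absurd h (pvEvLt_asymm (hPlt _ hEP)))
    · show do_line_segments_intersect (PySem.List.pyGetD segments ((i : Nat) : Int) pvDefaultSeg)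
        (PySem.List.pyGetD segments ((j : Nat) : Int) pvDefaultSeg) = true
      rw [PySem.List.pyGetD_natCast, PySem.List.pyGetD_natCast]
      exact hdls

-- B characterized ------------------------------------------------------------

lemma pv_alt_iff (segments : List ((Int × Int) × (Int × Int))) :
    sweep_line_intersection_alt segments = true ↔
      ∃ i j : Nat, i < segments.length ∧ j < segments.length ∧ i < j ∧
        pvSegmentsIntersect (segments.getD i pvDefaultSeg) (segments.getD j pvDefaultSeg)
          = true := by
  unfold sweep_line_intersection_alt
  simp only [List.any_eq_true, List.mem_range, List.mem_range']
  constructor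
  · rintro ⟨i, hi, j, hj, h⟩
    exact ⟨i, j, hi, by omega, by omega, h⟩
  · rintro ⟨i, j, hi, hj, hij, h⟩
    exact ⟨i, hi, j, ⟨j - (i + 1), by omega, by omega⟩, h⟩

-- the two geometric predicates -----------------------------------------------

lemma pv_sign_ne (v w : Int) :
    ((if v = 0 then (0:Int) else if v > 0 then 1 else 2) ≠
      (if w = 0 then (0:Int) else if w > 0 then 1 else 2)) ↔ pvSign (-v) ≠ pvSign (-w) := by
  unfold pvSign; split_ifs <;> omega

lemma pv_sign_zero (v : Int) :
    ((if v = 0 then (0:Int) else if v > 0 then 1 else 2) = 0) ↔ (-v = 0) := by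
  split_ifs <;> omega

lemma pvOrientation_def (p q r : Int × Int) :
    pvOrientation p q r =
      if ((q.2 - p.2) * (r.1 - q.1) - (q.1 - p.1) * (r.2 - q.2)) = 0 then 0
      else if ((q.2 - p.2) * (r.1 - q.1) - (q.1 - p.1) * (r.2 - q.2)) > 0 then 1 else 2 := rfl

lemma pv_cross_val (p q r : Int × Int) :
    pvCross p q r = -((q.2 - p.2) * (r.1 - q.1) - (q.1 - p.1) * (r.2 - q.2)) := by
  unfold pvCross; ring

lemma pv_onSeg_eq (p q r : Int × Int) : pvOnSegment p q r = pvInBox p q r := by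
  simp only [pvOnSegment, pvInBox, decide_eq_decide]
  tauto

lemma pv_intersect_eq (s t : (Int × Int) × (Int × Int)) :
    do_line_segments_intersect s t = pvSegmentsIntersect s t := by
  have hne1 : (pvOrientation s.1 s.2 t.1 ≠ pvOrientation s.1 s.2 t.2) ↔
      (pvSign (pvCross s.1 s.2 t.1) ≠ pvSign (pvCross s.1 s.2 t.2)) := by
    rw [pvOrientation_def, pvOrientation_def, pv_sign_ne, ← pv_cross_val, ← pv_cross_val]
  have hne2 : (pvOrientation t.1 t.2 s.1 ≠ pvOrientation t.1 t.2 s.2) ↔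
      (pvSign (pvCross t.1 t.2 s.1) ≠ pvSign (pvCross t.1 t.2 s.2)) := by
    rw [pvOrientation_def, pvOrientation_def, pv_sign_ne, ← pv_cross_val, ← pv_cross_val]
  have hz1 : (pvOrientation s.1 s.2 t.1 = 0) ↔ pvCross s.1 s.2 t.1 = 0 := by
    rw [pvOrientation_def, pv_sign_zero, ← pv_cross_val]
  have hz2 : (pvOrientation s.1 s.2 t.2 = 0) ↔ pvCross s.1 s.2 t.2 = 0 := by
    rw [pvOrientation_def, pv_sign_zero, ← pv_cross_val]
  have hz3 : (pvOrientation t.1 t.2 s.1 = 0) ↔ pvCross t.1 t.2 s.1 = 0 := by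
    rw [pvOrientation_def, pv_sign_zero, ← pv_cross_val]
  have hz4 : (pvOrientation t.1 t.2 s.2 = 0) ↔ pvCross t.1 t.2 s.2 = 0 := by
    rw [pvOrientation_def, pv_sign_zero, ← pv_cross_val]
  rw [Bool.eq_iff_iff]
  unfold do_line_segments_intersect pvSegmentsIntersect
  simp only [pv_onSeg_eq]
  constructor
  · intro h
    split_ifs at h with hA
    rcases hA with h1 | h1 | h1 | h1 | h1
    · rw [if_pos ⟨hne1.mp h1.1, hne2.mp h1.2⟩]
    · split_ifs
      · rfl
      · exact decide_eq_true (Or.inl ⟨hz1.mp h1.1, h1.2⟩)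
    · split_ifs
      · rfl
      · exact decide_eq_true (Or.inr (Or.inl ⟨hz2.mp h1.1, h1.2⟩))
    · split_ifs
      · rfl
      · exact decide_eq_true (Or.inr (Or.inr (Or.inl ⟨hz3.mp h1.1, h1.2⟩)))
    · split_ifs
      · rfl
      · exact decide_eq_true (Or.inr (Or.inr (Or.inr ⟨hz4.mp h1.1, h1.2⟩)))
  · intro h
    split_ifs at h with hC
    · rw [if_pos (Or.inl ⟨hne1.mpr hC.1, hne2.mpr hC.2⟩)]
    · have hD := of_decide_eq_true h
      rw [if_pos]
      rcases hD with h1 | h1 | h1 | h1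
      · exact Or.inr (Or.inl ⟨hz1.mpr h1.1, h1.2⟩)
      · exact Or.inr (Or.inr (Or.inl ⟨hz2.mpr h1.1, h1.2⟩))
      · exact Or.inr (Or.inr (Or.inr (Or.inl ⟨hz3.mpr h1.1, h1.2⟩)))
      · exact Or.inr (Or.inr (Or.inr (Or.inr ⟨hz4.mpr h1.1, h1.2⟩)))

lemma pvSI_symm (s t : (Int × Int) × (Int × Int)) :
    pvSegmentsIntersect s t = pvSegmentsIntersect t s := by
  simp only [pvSegmentsIntersect]
  split_ifs with h1 h2 h3
  · rfl
  · exact absurd ⟨h1.2, h1.1⟩ h2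
  · exact absurd ⟨h3.2, h3.1⟩ h1
  · rw [Bool.eq_iff_iff, decide_eq_true_iff, decide_eq_true_iff]
    tauto

lemma pv_dls_symm (s t : (Int × Int) × (Int × Int)) :
    do_line_segments_intersect s t = do_line_segments_intersect t s := by
  rw [pv_intersect_eq, pv_intersect_eq, pvSI_symm]

-- dMissed bridged to the event order ------------------------------------------

lemma pv_str_e_lt_s : (("end" : String) < "start") := by
  rw [String.lt_iff_toList_lt]; decide

lemma pv_str_not_s_lt_e : ¬ (("start" : String) < "end") := by
  rw [String.lt_iff_toList_lt]; decide

lemma dMissed_iff (segments : List ((Int × Int) × (Int × Int))) (i j : Nat) (hij : i ≠ j) :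
    dMissed (segments.getD i pvDefaultSeg) (segments.getD j pvDefaultSeg) i j ↔
      ((pvEvLt (pvS segments i) (pvE segments i) ∧ pvEvLt (pvE segments i) (pvS segments j)) ∨
        (pvEvLt (pvS segments j) (pvE segments j) ∧ pvEvLt (pvE segments j) (pvS segments i))) := by
  unfold dMissed
  simp only [pvEvLt_iff, Prod.Lex.toLex_lt_toLex, pvS, pvE, Prod.ext_iff,
    eq_true pv_str_e_lt_s, eq_false pv_str_not_s_lt_e, and_true, and_false, or_false,
    Nat.cast_lt, Nat.cast_inj]
  omega

-- totality and transitivity of the event order ---------------------------------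

lemma pv_tot (e f : (Int × Int) × Int × String) (h : e ≠ f) : pvEvLt e f ∨ pvEvLt f e := by
  unfold pvEvLt
  rcases lt_trichotomy (pvEvKey e) (pvEvKey f) with h' | h' | h'
  · exact Or.inl h'
  · exact absurd (pvEvKey_inj h') h
  · exact Or.inr h'

lemma pvEvLt_trans {a b c : (Int × Int) × Int × String}
    (h1 : pvEvLt a b) (h2 : pvEvLt b c) : pvEvLt a c := by
  unfold pvEvLt at *
  exact lt_trans h1 h2

-- from ¬ dMissed to A's 'active' condition --------------------------------------

lemma pv_active_of_not_missed (segments : List ((Int × Int) × (Int × Int))) (i j : Nat)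
    (hij : j ≠ i)
    (hm : ¬ (pvEvLt (pvS segments j) (pvE segments j) ∧
      pvEvLt (pvE segments j) (pvS segments i))) :
    pvEvLt (pvE segments j) (pvS segments j) ∨ pvEvLt (pvS segments i) (pvE segments j) := by
  by_cases h1 : pvEvLt (pvS segments j) (pvE segments j)
  · refine Or.inr ?_
    rcases pv_tot (pvE segments j) (pvS segments i) (fun h => pvS_ne_pvE i j h.symm) with h | h
    · exact absurd ⟨h1, h⟩ hm
    · exact h
  · refine Or.inl ?_
    rcases pv_tot (pvS segments j) (pvE segments j) (pvS_ne_pvE j j) with h | h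
    · exact absurd h h1
    · exact h

-- D_ characterized over indices -------------------------------------------------

lemma pvD_iff (segments : List ((Int × Int) × (Int × Int))) :
    D_sweep_line_intersection segments ↔
      ((∃ i j : Nat, i < segments.length ∧ j < segments.length ∧ i < j ∧
          do_line_segments_intersect (segments.getD i pvDefaultSeg)
            (segments.getD j pvDefaultSeg) = true) ∧
        (∀ i j : Nat, i < segments.length → j < segments.length → i < j →
          do_line_segments_intersect (segments.getD i pvDefaultSeg)
            (segments.getD j pvDefaultSeg) = true →
          dMissed (segments.getD i pvDefaultSeg) (segments.getD j pvDefaultSeg) i j)) := by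
  have hg : ∀ k, ∀ hk : k < segments.length, segments.getD k pvDefaultSeg = segments[k] :=
    fun k hk => List.getD_eq_getElem segments pvDefaultSeg hk
  unfold D_sweep_line_intersection
  simp only [List.exists_mem_zipIdx', List.forall_mem_zipIdx']
  constructor
  · rintro ⟨⟨i, hi, j, hj, hij, hint⟩, hall⟩
    refine ⟨⟨i, j, hi, hj, hij, by rw [hg i hi, hg j hj]; exact hint⟩, ?_⟩
    intro a b ha hb hab hint2
    rw [hg a ha, hg b hb]
    exact hall a ha b hb hab (by rw [← hg a ha, ← hg b hb]; exact hint2)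
  · rintro ⟨⟨i, j, hi, hj, hij, hint⟩, hall⟩
    refine ⟨⟨i, hi, j, hj, hij, by rw [← hg i hi, ← hg j hj]; exact hint⟩, ?_⟩
    intro a ha b hb hab hint2
    rw [← hg a ha, ← hg b hb]
    exact hall a b ha hb hab (by rw [hg a ha, hg b hb]; exact hint2)

-- ===== VERDICT (by name: the statement is the Claim_ definition above) =====
theorem sweep_line_intersection_spec : Claim_unchanged_sweep_line_intersection := by
  intro segments _ hnD
  rw [Bool.eq_iff_iff, pv_sweep_iff, pv_alt_iff]
  constructor
  · rintro ⟨i, j, hi, hj, hlt, _, hdls⟩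
    have hSI : pvSegmentsIntersect (segments.getD i pvDefaultSeg) (segments.getD j pvDefaultSeg)
        = true := (pv_intersect_eq _ _) ▸ hdls
    rcases Nat.lt_or_ge i j with h | h
    · exact ⟨i, j, hi, hj, h, hSI⟩
    · have hij : j ≠ i := by
        intro he
        rw [he] at hlt
        exact absurd hlt (lt_irrefl _)
      exact ⟨j, i, hj, hi, by omega, (pvSI_symm _ _) ▸ hSI⟩
  · rintro ⟨i, j, hi, hj, hij, hSI⟩
    have hBex : (∃ a b : Nat, a < segments.length ∧ b < segments.length ∧ a < b ∧
        do_line_segments_intersect (segments.getD a pvDefaultSeg)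
          (segments.getD b pvDefaultSeg) = true) :=
      ⟨i, j, hi, hj, hij, by rw [pv_intersect_eq]; exact hSI⟩
    have hnotall : ¬ (∀ a b : Nat, a < segments.length → b < segments.length → a < b →
        do_line_segments_intersect (segments.getD a pvDefaultSeg)
          (segments.getD b pvDefaultSeg) = true →
        dMissed (segments.getD a pvDefaultSeg) (segments.getD b pvDefaultSeg) a b) :=
      fun hall => hnD ((pvD_iff segments).mpr ⟨hBex, hall⟩)
    push_neg at hnotall
    obtain ⟨a, b, ha, hb, hab, hint, hnm⟩ := hnotall
    rw [dMissed_iff segments a b (by omega)] at hnm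
    push_neg at hnm
    obtain ⟨hm1, hm2⟩ := hnm
    have hne : b ≠ a := by omega
    rcases pv_tot (pvS segments b) (pvS segments a) (fun h => hne (pvS_inj h)) with hlt | hlt
    · exact ⟨a, b, ha, hb, hlt,
        pv_active_of_not_missed segments a b hne (fun hc => absurd hc.2 (hm2 hc.1)), hint⟩
    · exact ⟨b, a, hb, ha, hlt,
        pv_active_of_not_missed segments b a (fun h => hne h.symm)
          (fun hc => absurd hc.2 (hm1 hc.1)), (pv_dls_symm _ _) ▸ hint⟩

theorem sweep_line_intersection_tight : Claim_exact_sweep_line_intersection := by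
  intro segments _ hD
  obtain ⟨⟨i0, j0, hi0, hj0, hij0, hint0⟩, hall⟩ := (pvD_iff segments).mp hD
  have hB : sweep_line_intersection_alt segments = true :=
    (pv_alt_iff segments).mpr ⟨i0, j0, hi0, hj0, hij0, (pv_intersect_eq _ _) ▸ hint0⟩
  have hA : sweep_line_intersection segments = false := by
    rw [← Bool.not_eq_true, pv_sweep_iff]
    rintro ⟨i, j, hi, hj, hlt, hcond, hdls⟩
    have hij : j ≠ i := by
      intro h
      rw [h] at hlt
      exact absurd hlt (lt_irrefl _)
    have hm : (pvEvLt (pvS segments i) (pvE segments i) ∧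
          pvEvLt (pvE segments i) (pvS segments j)) ∨
        (pvEvLt (pvS segments j) (pvE segments j) ∧
          pvEvLt (pvE segments j) (pvS segments i)) := by
      rcases Nat.lt_or_ge i j with h | h
      · exact (dMissed_iff segments i j (by omega)).mp (hall i j hi hj h hdls)
      · rcases (dMissed_iff segments j i (by omega)).mp
          (hall j i hj hi (by omega) ((pv_dls_symm _ _) ▸ hdls)) with hm | hm
        · exact Or.inr hm
        · exact Or.inl hm
    rcases hm with hm | hm
    · exact absurd hlt (pvEvLt_asymm (pvEvLt_trans hm.1 hm.2))
    · rcases hcond with h | h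
      · exact absurd hm.1 (pvEvLt_asymm h)
      · exact absurd hm.2 (pvEvLt_asymm h)
  rw [hA, hB]
  exact Bool.false_ne_true

theorem sweep_line_intersection_changed : Claim_changed_sweep_line_intersection := by
  unfold Claim_changed_sweep_line_intersection
  refine ⟨by decide, by decide, ?_, by decide, by decide⟩
  have ht := sweep_line_intersection_tight pvDiffWitness_sweep_line_intersection
    (by decide) (by decide)
  have hb : sweep_line_intersection_alt pvDiffWitness_sweep_line_intersection = true := by decide
  rw [hb] at ht
  show sweep_line_intersection pvDiffWitness_sweep_line_intersection = false
  exact Bool.eq_false_iff.mpr ht
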